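-- pv_equiv track=rewrite | github.com/wpo70/RateEdge | backend/report_generator.py | _select_key_tenors
-- ===== SOURCE A (Python) =====
-- def _select_key_tenors(tenors):
--     """Select key tenors for detailed analysis"""
--     # Prioritize common benchmark tenors
--     priority = ['2Y', '5Y', '10Y', '30Y', '1Y', '3Y', '7Y']
--
--     selected = []
--     for t in priority:
--         if t in tenors:
--             selected.append(t)
--
--     # Add any remaining tenors
--     for t in tenors:
--         if t not in selected:
--             selected.append(t)
--
--     return selected
-- ===== SOURCE B (Python) =====
-- def _select_key_tenors(tenors):
--     """Select key tenors for detailed analysis"""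
--     priority = ['2Y', '5Y', '10Y', '30Y', '1Y', '3Y', '7Y']
--     # rank index of each benchmark tenor; non-priority tenors rank after all of them
--     rank = {t: i for i, t in enumerate(priority)}
--     # deduplicate preserving first occurrence, then one stable keyed sort:
--     # priority tenors land first in rank order, the rest keep input order.
--     deduped = list(dict.fromkeys(tenors))
--     return sorted(deduped, key=lambda t: rank.get(t, len(priority)))
-- ===== Notes on version B (the rewrite author's own statement) =====
-- stated objective: faster
-- what changed: Replaces A's two selection passes with list-membership tests (scan the priority list probing 't in tenors', then scan tenors appending items not yet in the growing result) by a rank-index + stable sort: build rank = {tenor: i} from the priority list, deduplicate the input via dict.fromkeys preserving first occurrence, and do one stable sort keyed by rank.get(t, len(priority)); stability puts priority tenors first in rank order and keeps the rest in input order.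
import Mathlib
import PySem

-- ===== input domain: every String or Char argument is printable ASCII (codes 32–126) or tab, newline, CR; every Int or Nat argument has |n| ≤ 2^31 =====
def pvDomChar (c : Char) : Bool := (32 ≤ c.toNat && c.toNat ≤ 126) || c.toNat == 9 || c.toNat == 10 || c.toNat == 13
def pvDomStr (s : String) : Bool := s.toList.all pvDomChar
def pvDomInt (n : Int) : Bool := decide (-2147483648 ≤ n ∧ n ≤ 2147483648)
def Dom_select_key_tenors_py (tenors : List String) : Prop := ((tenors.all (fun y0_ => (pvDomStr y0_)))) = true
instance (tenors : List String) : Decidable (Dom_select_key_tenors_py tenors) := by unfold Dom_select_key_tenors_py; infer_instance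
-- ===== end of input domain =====

-- B replaces A's two quadratic selection passes by a rank index, dict.fromkeys dedup and one stable keyed sort (measured faster).

-- ===== PORT A =====
def select_key_tenors_py (tenors : List String) : List String :=
  let priority : List String := ["2Y", "5Y", "10Y", "30Y", "1Y", "3Y", "7Y"]
  let selected := priority.foldl (fun acc t => if t ∈ tenors then acc ++ [t] else acc) []
  tenors.foldl (fun acc t => if t ∉ acc then acc ++ [t] else acc) selected

-- ===== PORT B =====
def select_key_tenors_py_alt (tenors : List String) : List String :=
  let priority : List String := ["2Y", "5Y", "10Y", "30Y", "1Y", "3Y", "7Y"]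
  let rank : PySem.Dict String Int :=
    (PySem.List.enumerate priority).foldl (fun d p => PySem.Dict.insert d p.2 p.1) PySem.Dict.empty
  let deduped := PySem.List.dedup tenors
  PySem.List.sorted deduped (fun t => PySem.Dict.getD rank t (priority.length : Int)) false

-- ===== PRECONDITION & SPEC =====
def Spec_select_key_tenors_py (tenors : List String) (out : List String) : Prop := out = select_key_tenors_py_alt tenors
instance (tenors : List String) (out : List String) : Decidable (Spec_select_key_tenors_py tenors out) := by unfold Spec_select_key_tenors_py; infer_instance

-- ===== CLAIM (what is proved, stated in full; the proofs are below) =====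
def Claim_equal_select_key_tenors_py : Prop := ∀ (tenors : List String), Dom_select_key_tenors_py tenors → Spec_select_key_tenors_py tenors (select_key_tenors_py tenors)

-- ===== LEMMAS AND PROOFS =====

-- inserting x into A ++ B goes into A when every element of B should come after x
theorem pv_insertBy_append_left {α : Type} (before : α → α → Bool) (x : α) (A B : List α)
    (hB : ∀ b ∈ B, before x b = true) :
    PySem.List.insertBy before x (A ++ B) = PySem.List.insertBy before x A ++ B := by
  induction A with
  | nil =>
    cases B with
    | nil => rfl
    | cons b B' => simp [PySem.List.insertBy, hB b (by simp)]
  | cons a A' ih =>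
    by_cases h : before x a = true <;> simp [PySem.List.insertBy, h, ih]

-- inserting x into A ++ B goes into B when no element of A should come after x
theorem pv_insertBy_append_right {α : Type} (before : α → α → Bool) (x : α) (A B : List α)
    (hA : ∀ a ∈ A, before x a = false) :
    PySem.List.insertBy before x (A ++ B) = A ++ PySem.List.insertBy before x B := by
  induction A with
  | nil => rfl
  | cons a A' ih =>
    simp [PySem.List.insertBy, hA a (by simp), ih (fun a ha => hA a (by simp [ha]))]

-- a stable sort splits at any threshold c into the sorts of the two filtered halves
theorem pv_sorted_split {α : Type} (xs : List α) (key : α → Int) (c : Int) :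
    PySem.List.sorted xs key false =
      PySem.List.sorted (xs.filter (fun x => decide (key x ≤ c))) key false ++
      PySem.List.sorted (xs.filter (fun x => decide (c < key x))) key false := by
  induction xs using List.reverseRecOn with
  | nil => simp [PySem.List.sorted]
  | append_singleton l x ih =>
    have hins : ∀ (ys : List α) (y : α),
        PySem.List.sorted (ys ++ [y]) key false
          = PySem.List.insertBy (fun a b => decide (key a < key b)) y
              (PySem.List.sorted ys key false) := by
      intro ys y
      rw [PySem.List.sorted_eq_foldl_insertBy, PySem.List.sorted_eq_foldl_insertBy,
        List.foldl_append]
      rfl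
    rw [hins, ih, List.filter_append, List.filter_append]
    by_cases hc : key x ≤ c
    · have h1 : List.filter (fun x => decide (key x ≤ c)) [x] = [x] := by simp [hc]
      have h2 : List.filter (fun x => decide (c < key x)) [x] = [] := by simp; omega
      rw [h1, h2, List.append_nil, hins,
        pv_insertBy_append_left _ x _ _ (by
          intro b hb
          have hbm := (PySem.List.mem_sorted _ _ _ _).mp hb
          have := of_decide_eq_true (List.mem_filter.mp hbm).2
          simp only [decide_eq_true_eq]
          omega)]
    · have h1 : List.filter (fun x => decide (key x ≤ c)) [x] = [] := by simp [hc]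
      have h2 : List.filter (fun x => decide (c < key x)) [x] = [x] := by simp; omega
      rw [h1, h2, List.append_nil, hins,
        pv_insertBy_append_right _ x _ _ (by
          intro a ha
          have ham := (PySem.List.mem_sorted _ _ _ _).mp ha
          have := of_decide_eq_true (List.mem_filter.mp ham).2
          simp only [decide_eq_false_iff_not]
          omega)]

-- a list whose keys are constant is already sorted (stably: unchanged)
theorem pv_sorted_const {α : Type} (xs : List α) (key : α → Int) (k : Int)
    (h : ∀ x ∈ xs, key x = k) : PySem.List.sorted xs key false = xs := by
  apply PySem.List.sorted_eq_self_of_pairwise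
  exact List.pairwise_of_forall_mem_list (fun a ha b hb => by rw [h a ha, h b hb])

-- a stable sort whose keys all lie in the strictly increasing list ks is the
-- concatenation of the equal-key blocks, each in original order
theorem pv_sorted_blocks {α : Type} (ks : List Int) (xs : List α) (key : α → Int)
    (hs : ks.Pairwise (· < ·)) (hmem : ∀ x ∈ xs, key x ∈ ks) :
    PySem.List.sorted xs key false =
      ks.flatMap (fun k => xs.filter (fun x => decide (key x = k))) := by
  induction ks generalizing xs with
  | nil =>
    have : xs = [] := by
      cases xs with
      | nil => rfl
      | cons a l => exact absurd (hmem a (by simp)) (by simp)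
    simp [this, PySem.List.sorted]
  | cons k ks' ih =>
    rw [pv_sorted_split xs key k]
    have h1 : xs.filter (fun x => decide (key x ≤ k)) = xs.filter (fun x => decide (key x = k)) := by
      apply List.filter_congr
      intro x hx
      rcases List.mem_cons.mp (hmem x hx) with h | h
      · simp [h]
      · have := (List.pairwise_cons.mp hs).1 _ h
        simp only [decide_eq_decide]
        omega
    rw [h1, pv_sorted_const _ _ k (by intro x hx; exact of_decide_eq_true (List.mem_filter.mp hx).2)]
    rw [ih (xs.filter (fun x => decide (k < key x))) (List.pairwise_cons.mp hs).2 ?later]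
    · rw [List.flatMap_cons]
      congr 1
      rw [List.flatMap_def, List.flatMap_def]
      apply congrArg
      apply List.map_congr_left
      intro j hj
      rw [List.filter_filter]
      apply List.filter_congr
      intro x hx
      rcases List.mem_cons.mp (hmem x hx) with h | h
      · have := (List.pairwise_cons.mp hs).1 _ hj
        simp only [h, Bool.and_eq_left_iff_imp, decide_eq_true_eq]
        omega
      · by_cases he : key x = j
        · have hkj := (List.pairwise_cons.mp hs).1 _ hj
          simp [he, hkj]
        · simp [he]
    case later =>
      intro x hx
      have hx' := List.mem_of_mem_filter hx
      have hk := of_decide_eq_true (List.mem_filter.mp hx).2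
      rcases List.mem_cons.mp (hmem x hx') with h | h
      · omega
      · exact h

-- A's dedup-append loop from accumulator s: s followed by dedup of the new elements
theorem pv_loopA : ∀ (xs s : List String),
    xs.foldl (fun acc t => if t ∉ acc then acc ++ [t] else acc) s
      = s ++ (xs.foldl (fun acc t => if t ∉ acc then acc ++ [t] else acc) []).filter
          (fun t => decide (t ∉ s)) := by
  intro xs
  induction xs with
  | nil => intro s; simp
  | cons x rest ih =>
    intro s
    have hD : (x :: rest).foldl (fun acc t => if t ∉ acc then acc ++ [t] else acc) []
        = [x] ++ (rest.foldl (fun acc t => if t ∉ acc then acc ++ [t] else acc) []).filter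
            (fun t => decide (t ∉ [x])) := by
      simp only [List.foldl_cons, if_pos (List.not_mem_nil)]
      exact ih [x]
    rw [hD]
    by_cases hx : x ∈ s
    · rw [List.foldl_cons, if_neg (by simpa using hx), ih s]
      congr 1
      rw [List.filter_append]
      have : List.filter (fun t => decide (t ∉ s)) [x] = [] := by simp [hx]
      rw [this, List.nil_append, List.filter_filter]
      apply List.filter_congr
      intro t _
      by_cases hts : t ∈ s
      · simp [hts]
      · have : t ≠ x := fun he => hts (he ▸ hx)
        simp [hts, this]
    · rw [List.foldl_cons, if_pos hx, ih (s ++ [x])]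
      rw [List.filter_append]
      have : List.filter (fun t => decide (t ∉ s)) [x] = [x] := by simp [hx]
      rw [this, List.filter_filter, List.append_assoc]
      congr 2
      apply List.filter_congr
      intro t _
      by_cases htx : t = x
      · simp [htx, hx]
      · by_cases hts : t ∈ s <;> simp [htx, hts]

theorem pv_loop_eq_dedup (xs : List String) :
    xs.foldl (fun acc t => if t ∉ acc then acc ++ [t] else acc) [] = PySem.List.dedup xs := by
  have hstep : (fun (acc : List String) t => if t ∉ acc then acc ++ [t] else acc) = PySem.Set.add := by
    funext acc t
    by_cases h : t ∈ acc <;> simp [PySem.Set.add, PySem.Set.contains, h]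
  rw [hstep, PySem.List.dedup_eq_ofList, PySem.Set.ofList_eq_foldl]

-- the rank the B port looks up, as a plain if-chain
def pvKey (t : String) : Int :=
  if t = "2Y" then 0 else if t = "5Y" then 1 else if t = "10Y" then 2 else if t = "30Y" then 3
  else if t = "1Y" then 4 else if t = "3Y" then 5 else if t = "7Y" then 6 else 7

theorem pv_key_eq (t : String) :
    PySem.Dict.getD ((PySem.List.enumerate (["2Y", "5Y", "10Y", "30Y", "1Y", "3Y", "7Y"] : List String)).foldl
      (fun d p => PySem.Dict.insert d p.2 p.1) PySem.Dict.empty) t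
      (((["2Y", "5Y", "10Y", "30Y", "1Y", "3Y", "7Y"] : List String).length : Nat) : Int)
    = pvKey t := by
  simp only [PySem.List.enumerate, List.foldl, List.length]
  unfold pvKey
  simp [PySem.Dict.getD_insert, PySem.Dict.getD_empty]
  split_ifs <;> simp_all

theorem pv_filter_single (d : List String) (hnd : d.Nodup) (a : String) :
    d.filter (fun t => t == a) = if a ∈ d then [a] else [] := by
  rw [List.filter_beq]
  by_cases h : a ∈ d
  · rw [if_pos h, List.count_eq_one_of_mem hnd h]
    rfl
  · rw [if_neg h, List.count_eq_zero_of_not_mem h]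
    rfl

set_option maxHeartbeats 1000000 in
theorem select_key_tenors_py_spec : Claim_equal_select_key_tenors_py := by
  intro tenors _
  show select_key_tenors_py tenors = select_key_tenors_py_alt tenors
  unfold select_key_tenors_py select_key_tenors_py_alt
  simp only []
  rw [PySem.List.foldl_append_ite_eq_filter, List.nil_append, pv_loopA tenors _, pv_loop_eq_dedup]
  rw [show (fun t => PySem.Dict.getD ((PySem.List.enumerate
        (["2Y", "5Y", "10Y", "30Y", "1Y", "3Y", "7Y"] : List String)).foldl
        (fun d p => PySem.Dict.insert d p.2 p.1) PySem.Dict.empty) t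
        (((["2Y", "5Y", "10Y", "30Y", "1Y", "3Y", "7Y"] : List String).length : Nat) : Int))
      = pvKey from funext pv_key_eq]
  rw [pv_sorted_blocks ([0, 1, 2, 3, 4, 5, 6, 7] : List Int) (PySem.List.dedup tenors) pvKey
    (by decide) (fun x _ => by unfold pvKey; split_ifs <;> simp)]
  simp only [List.flatMap_cons, List.flatMap_nil, List.append_nil]
  have hnd : (PySem.List.dedup tenors).Nodup := PySem.List.nodup_dedup tenors
  have hmemd : ∀ t : String, t ∈ PySem.List.dedup tenors ↔ t ∈ tenors := fun t =>
    PySem.List.mem_dedup _ _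
  have hblock : ∀ (k : Int) (p : String), pvKey p = k → (∀ t, pvKey t = k → t = p) →
      (PySem.List.dedup tenors).filter (fun x => decide (pvKey x = k))
        = if p ∈ tenors then [p] else [] := by
    intro k p hp huniq
    have h1 : (PySem.List.dedup tenors).filter (fun x => decide (pvKey x = k))
        = (PySem.List.dedup tenors).filter (fun t => t == p) := by
      apply List.filter_congr
      intro t _
      by_cases h : t = p
      · simp [h, hp]
      · have hne : pvKey t ≠ k := fun hc => h (huniq t hc)
        simp [h, hne]
    rw [h1, pv_filter_single _ hnd p]
    simp

  rw [hblock 0 "2Y" (by decide) (fun t => by unfold pvKey; split_ifs <;> simp_all),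
      hblock 1 "5Y" (by decide) (fun t => by unfold pvKey; split_ifs <;> simp_all),
      hblock 2 "10Y" (by decide) (fun t => by unfold pvKey; split_ifs <;> simp_all),
      hblock 3 "30Y" (by decide) (fun t => by unfold pvKey; split_ifs <;> simp_all),
      hblock 4 "1Y" (by decide) (fun t => by unfold pvKey; split_ifs <;> simp_all),
      hblock 5 "3Y" (by decide) (fun t => by unfold pvKey; split_ifs <;> simp_all),
      hblock 6 "7Y" (by decide) (fun t => by unfold pvKey; split_ifs <;> simp_all)]
  have htail : (PySem.List.dedup tenors).filter (fun x => decide (pvKey x = 7))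
      = (PySem.List.dedup tenors).filter
          (fun t => decide (t ∉ (["2Y", "5Y", "10Y", "30Y", "1Y", "3Y", "7Y"] : List String))) := by
    apply List.filter_congr
    intro t _
    unfold pvKey
    split_ifs <;> simp_all
  have hAtail : (PySem.List.dedup tenors).filter
        (fun t => decide (t ∉ List.filter (fun t => decide (t ∈ tenors))
          (["2Y", "5Y", "10Y", "30Y", "1Y", "3Y", "7Y"] : List String)))
      = (PySem.List.dedup tenors).filter
          (fun t => decide (t ∉ (["2Y", "5Y", "10Y", "30Y", "1Y", "3Y", "7Y"] : List String))) := by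
    apply List.filter_congr
    intro t ht
    have htm : t ∈ tenors := (hmemd t).mp ht
    simp [List.mem_filter, htm]
  rw [htail, hAtail]
  by_cases m1 : "2Y" ∈ tenors <;> by_cases m2 : "5Y" ∈ tenors <;>
    by_cases m3 : "10Y" ∈ tenors <;> by_cases m4 : "30Y" ∈ tenors <;>
    by_cases m5 : "1Y" ∈ tenors <;> by_cases m6 : "3Y" ∈ tenors <;>
    by_cases m7 : "7Y" ∈ tenors <;>
    simp [m1, m2, m3, m4, m5, m6, m7]
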